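-- pv_equiv track=rewrite | github.com/rahberabbas/SimpleElasticSearch | search_engine/engine/searcher.py | _check_consecutive_terms
-- ===== SOURCE A (Python) =====
-- def _check_consecutive_terms(tokens, phrase_terms):
--     """Check if phrase terms appear consecutively in tokens"""
--     if len(tokens) < len(phrase_terms):
--         return False
--
--     for i in range(len(tokens) - len(phrase_terms) + 1):
--         match = True
--         for j in range(len(phrase_terms)):
--             if tokens[i + j] != phrase_terms[j]:
--                 match = False
--                 break
--
--         if match:
--             return True
--
--     return False
-- ===== SOURCE B (Python) =====
-- def _check_consecutive_terms(tokens, phrase_terms):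
--     """Single two-pointer scan: advance both pointers on a match, and on a
--     mismatch restart the text pointer just after the current candidate start,
--     instead of re-checking every offset with a nested loop."""
--     n = len(tokens)
--     m = len(phrase_terms)
--     if m == 0:
--         return True
--     i = 0
--     j = 0
--     while i < n:
--         if tokens[i] == phrase_terms[j]:
--             i += 1
--             j += 1
--             if j == m:
--                 return True
--         else:
--             i = i - j + 1
--             j = 0
--     return False
-- ===== Notes on version B (the rewrite author's own statement) =====
-- stated objective: alternative
-- what changed: Replaces A's nested loops (try every start offset, re-check the whole phrase with an inner loop and a match flag) by a single two-pointer scan that advances both pointers on a match and, on a mismatch, restarts the text pointer just past the current candidate start.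
import Mathlib
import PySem

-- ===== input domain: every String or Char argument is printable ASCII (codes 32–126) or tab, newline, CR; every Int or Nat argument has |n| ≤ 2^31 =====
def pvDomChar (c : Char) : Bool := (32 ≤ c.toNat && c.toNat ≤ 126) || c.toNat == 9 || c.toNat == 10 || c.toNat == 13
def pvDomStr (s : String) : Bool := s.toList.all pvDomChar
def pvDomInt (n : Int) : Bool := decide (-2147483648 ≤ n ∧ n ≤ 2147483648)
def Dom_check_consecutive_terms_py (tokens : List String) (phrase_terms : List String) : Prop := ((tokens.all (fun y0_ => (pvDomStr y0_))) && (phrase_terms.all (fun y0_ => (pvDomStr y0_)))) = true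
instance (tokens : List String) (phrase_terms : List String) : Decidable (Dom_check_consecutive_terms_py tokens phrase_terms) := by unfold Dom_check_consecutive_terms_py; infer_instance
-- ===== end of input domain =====

-- B replaces A's nested scan-every-offset loops by one two-pointer scan that restarts the
-- text pointer after the candidate start on a mismatch (objective: alternative, same cost).

-- ===== PORT A =====
-- inner 'for j in range(len(phrase_terms)): if tokens[i+j] != phrase_terms[j]: match=False; break'
-- (indexing via pyGetD: every index this loop is called on in A is in range, see the lemmas below)
def pvAInner (tokens phrase_terms : List String) (i : Int) : List Int → Bool
  | [] => true
  | j :: js =>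
    if PySem.List.pyGetD tokens (i + j) "" ≠ PySem.List.pyGetD phrase_terms j "" then false
    else pvAInner tokens phrase_terms i js

-- outer 'for i in range(len(tokens) - len(phrase_terms) + 1): … if match: return True'
def pvALoop (tokens phrase_terms : List String) : List Int → Bool
  | [] => false
  | i :: is_ =>
    if pvAInner tokens phrase_terms i (PySem.List.pyRange 0 (phrase_terms.length : Int) 1) then true
    else pvALoop tokens phrase_terms is_

def check_consecutive_terms_py (tokens : List String) (phrase_terms : List String) : Bool :=
  if tokens.length < phrase_terms.length then false
  else pvALoop tokens phrase_terms
        (PySem.List.pyRange 0 ((tokens.length : Int) - (phrase_terms.length : Int) + 1) 1)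

-- ===== PORT B =====
-- the 'while i < n' loop of Source B; i, j are the two pointers (both stay >= 0 and j <= i in
-- every reachable state, so Nat arithmetic agrees with Python's int arithmetic, and both
-- indexings are in range whenever Python evaluates them). 'fuel' only makes the recursion
-- structural: the call below hands it more than the loop can ever iterate (established in
-- lemma B_iff below), so the 0-fuel branch is never reached.
def pvBLoop (tokens phrase_terms : List String) (n m : Nat) : Nat → Nat → Nat → Bool
  | 0, _, _ => false
  | fuel + 1, i, j =>
    if i < n then
      if PySem.List.pyGetD tokens (i : Int) "" = PySem.List.pyGetD phrase_terms (j : Int) "" then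
        if j + 1 = m then true
        else pvBLoop tokens phrase_terms n m fuel (i + 1) (j + 1)
      else pvBLoop tokens phrase_terms n m fuel (i - j + 1) 0
    else false

def check_consecutive_terms_py_alt (tokens : List String) (phrase_terms : List String) : Bool :=
  let n := tokens.length
  let m := phrase_terms.length
  if m = 0 then true
  else pvBLoop tokens phrase_terms n m ((n + 1) * (n + 2) + n + 1) 0 0

-- ===== PRECONDITION & SPEC =====
def Spec_check_consecutive_terms_py (tokens : List String) (phrase_terms : List String) (out : Bool) : Prop := out = check_consecutive_terms_py_alt tokens phrase_terms
instance (tokens : List String) (phrase_terms : List String) (out : Bool) : Decidable (Spec_check_consecutive_terms_py tokens phrase_terms out) := by unfold Spec_check_consecutive_terms_py; infer_instance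

-- ===== CLAIM (what is proved, stated in full; the proofs are below) =====
def Claim_equal_check_consecutive_terms_py : Prop := ∀ (tokens : List String) (phrase_terms : List String), Dom_check_consecutive_terms_py tokens phrase_terms → Spec_check_consecutive_terms_py tokens phrase_terms (check_consecutive_terms_py tokens phrase_terms)

-- ===== LEMMAS AND PROOFS =====

-- phrase_terms matches tokens starting at position s
def MatchAt (tokens phrase_terms : List String) (s : Nat) : Prop :=
  s + phrase_terms.length ≤ tokens.length ∧
    ∀ t, t < phrase_terms.length → tokens.getD (s + t) "" = phrase_terms.getD t ""

def Occ (tokens phrase_terms : List String) : Prop := ∃ s, MatchAt tokens phrase_terms s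

lemma aInner_iff (tokens phrase_terms : List String) (i : Nat) (js : List Int)
    (hjs : ∀ j ∈ js, 0 ≤ j) :
    pvAInner tokens phrase_terms (i : Int) js = true ↔
      ∀ j ∈ js, tokens.getD (i + j.toNat) "" = phrase_terms.getD j.toNat "" := by
  induction js with
  | nil => simp [pvAInner]
  | cons j js ih =>
    obtain ⟨k, rfl⟩ : ∃ k : Nat, j = (k : Int) := ⟨j.toNat, by have := hjs j (by simp); omega⟩
    have hcast : (i : Int) + (k : Int) = ((i + k : Nat) : Int) := by omega
    rw [pvAInner, hcast]
    simp only [PySem.List.pyGetD_natCast]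
    by_cases heq : tokens.getD (i + k) "" = phrase_terms.getD k ""
    · rw [if_neg (by simpa using heq)]
      rw [ih (fun x hx => hjs x (by simp [hx]))]
      simp only [List.getD_eq_getElem?_getD] at heq ⊢
      simp [heq]
    · rw [if_pos (by simpa using heq)]
      simp only [Bool.false_eq_true, false_iff]
      intro hall
      exact heq (by simpa using hall (k : Int) (by simp))

lemma aLoop_iff (tokens phrase_terms : List String) (is_ : List Int)
    (his : ∀ i ∈ is_, 0 ≤ i) :
    pvALoop tokens phrase_terms is_ = true ↔
      ∃ i ∈ is_, ∀ t, t < phrase_terms.length →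
        tokens.getD (i.toNat + t) "" = phrase_terms.getD t "" := by
  induction is_ with
  | nil => simp [pvALoop]
  | cons i is_ ih =>
    obtain ⟨k, rfl⟩ : ∃ k : Nat, i = (k : Int) := ⟨i.toNat, by have := his i (by simp); omega⟩
    rw [pvALoop]
    have hinner := aInner_iff tokens phrase_terms k
      (PySem.List.pyRange 0 (phrase_terms.length : Int) 1)
      (fun j hj => by
        have := (PySem.List.mem_pyRange_one (a := 0) (b := (phrase_terms.length : Int)) (x := j)).1 hj
        omega)
    have hcond : (pvAInner tokens phrase_terms (k : Int)
        (PySem.List.pyRange 0 (phrase_terms.length : Int) 1) = true) ↔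
        ∀ t, t < phrase_terms.length → tokens.getD (k + t) "" = phrase_terms.getD t "" := by
      rw [hinner]
      constructor
      · intro hall t ht
        simpa using hall (t : Int) ((PySem.List.mem_pyRange_one).2 (by omega))
      · intro hall j hj
        have hjb := (PySem.List.mem_pyRange_one).1 hj
        have := hall j.toNat (by omega)
        simpa using this
    by_cases hin : pvAInner tokens phrase_terms (k : Int)
        (PySem.List.pyRange 0 (phrase_terms.length : Int) 1) = true
    · rw [if_pos hin]
      simp only [true_iff]
      exact ⟨(k : Int), by simp, by simpa using hcond.1 hin⟩
    · rw [if_neg hin]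
      rw [ih (fun x hx => his x (by simp [hx]))]
      constructor
      · rintro ⟨x, hx, hmatch⟩
        exact ⟨x, by simp [hx], hmatch⟩
      · rintro ⟨x, hx, hmatch⟩
        rcases List.mem_cons.1 hx with rfl | hx'
        · exact absurd (hcond.2 (by simpa using hmatch)) hin
        · exact ⟨x, hx', hmatch⟩

lemma A_iff (tokens phrase_terms : List String) :
    check_consecutive_terms_py tokens phrase_terms = true ↔ Occ tokens phrase_terms := by
  unfold check_consecutive_terms_py
  by_cases hlen : tokens.length < phrase_terms.length
  · rw [if_pos hlen]
    simp only [Bool.false_eq_true, false_iff]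
    rintro ⟨s, hle, -⟩
    omega
  · rw [if_neg hlen]
    rw [aLoop_iff tokens phrase_terms _
      (fun i hi => by
        have := (PySem.List.mem_pyRange_one).1 hi
        omega)]
    constructor
    · rintro ⟨i, hi, hmatch⟩
      have hib := (PySem.List.mem_pyRange_one).1 hi
      exact ⟨i.toNat, by omega, hmatch⟩
    · rintro ⟨s, hle, hmatch⟩
      refine ⟨(s : Int), (PySem.List.mem_pyRange_one).2 (by omega), ?_⟩
      simpa [Int.toNat_natCast] using hmatch

lemma fuel_key (a b f r : Nat) (ha : 2 ≤ a) (hab : a * b ≤ f) (hr : r < b) :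
    (a - 1) * b + r < f := by
  have h1 : (a - 1) * b + b = a * b := by
    have h2 : a - 1 + 1 = a := by omega
    calc (a - 1) * b + b = ((a - 1) + 1) * b := by ring
      _ = a * b := by rw [h2]
  omega

lemma bLoop_iff (tokens phrase_terms : List String) (hm : 0 < phrase_terms.length) :
    ∀ (fuel i j : Nat),
    j ≤ i → i ≤ tokens.length → j < phrase_terms.length →
    (tokens.length + 1 - (i - j)) * (tokens.length + 2) + (tokens.length - i) < fuel →
    (∀ t, t < j → tokens.getD (i - j + t) "" = phrase_terms.getD t "") →
    (∀ s, s < i - j → ¬ MatchAt tokens phrase_terms s) →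
    (pvBLoop tokens phrase_terms tokens.length phrase_terms.length fuel i j = true ↔
      Occ tokens phrase_terms) := by
  intro fuel
  induction fuel with
  | zero => intro i j _ _ _ hfuel _ _; exact absurd hfuel (Nat.not_lt_zero _)
  | succ fuel ih =>
    intro i j hji hin hjm hfuel hpart hno
    rw [pvBLoop]
    by_cases h : i < tokens.length
    · rw [if_pos h]
      simp only [PySem.List.pyGetD_natCast]
      by_cases heq : tokens.getD i "" = phrase_terms.getD j ""
      · rw [if_pos heq]
        by_cases hdone : j + 1 = phrase_terms.length
        · rw [if_pos hdone]
          simp only [true_iff]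
          refine ⟨i - j, by omega, fun t ht => ?_⟩
          rcases Nat.lt_or_ge t j with htj | htj
          · exact hpart t htj
          · have htj' : t = j := by omega
            have hij : i - j + t = i := by omega
            rw [hij, htj']; exact heq
        · rw [if_neg hdone]
          refine ih (i + 1) (j + 1) (by omega) (by omega) (by omega) ?_ ?_ ?_
          · have he : i + 1 - (j + 1) = i - j := by omega
            rw [he]
            set c := (tokens.length + 1 - (i - j)) * (tokens.length + 2) with hc
            omega
          · intro t ht
            rcases Nat.lt_or_ge t j with htj | htj
            · have he : i + 1 - (j + 1) + t = i - j + t := by omega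
              rw [he]; exact hpart t htj
            · have htj' : t = j := by omega
              have he : i + 1 - (j + 1) + t = i := by omega
              rw [he, htj']; exact heq
          · intro s hs
            exact hno s (by omega)
      · rw [if_neg heq]
        refine ih (i - j + 1) 0 (by omega) (by omega) hm ?_ ?_ ?_
        · have hab : (tokens.length + 1 - (i - j)) * (tokens.length + 2) ≤ fuel := by
            set c := (tokens.length + 1 - (i - j)) * (tokens.length + 2) with hc
            omega
          have he : tokens.length + 1 - (i - j + 1 - 0) = tokens.length + 1 - (i - j) - 1 := by
            omega
          rw [he]
          exact fuel_key _ _ _ _ (by omega) hab (by omega)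
        · intro t ht; omega
        · intro s hs hmatch
          rcases Nat.lt_or_ge s (i - j) with hs' | hs'
          · exact hno s hs' hmatch
          · have hseq : s = i - j := by omega
            subst hseq
            obtain ⟨-, hall⟩ := hmatch
            have hj' := hall j hjm
            have hij : i - j + j = i := by omega
            rw [hij] at hj'
            exact heq hj'
    · rw [if_neg h]
      simp only [Bool.false_eq_true, false_iff]
      rintro ⟨s, hle, hall⟩
      rcases Nat.lt_or_ge s (i - j) with hs' | hs'
      · exact hno s hs' ⟨hle, hall⟩
      · omega

lemma B_iff (tokens phrase_terms : List String) :
    check_consecutive_terms_py_alt tokens phrase_terms = true ↔ Occ tokens phrase_terms := by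
  unfold check_consecutive_terms_py_alt
  by_cases hm : phrase_terms.length = 0
  · rw [if_pos hm]
    simp only [true_iff]
    exact ⟨0, by omega, fun t ht => by omega⟩
  · rw [if_neg hm]
    refine bLoop_iff tokens phrase_terms (by omega) _ 0 0 (by omega) (by omega) (by omega) ?_
      (fun t ht => by omega) (fun s hs => by omega)
    simp only [Nat.sub_zero]
    set c := (tokens.length + 1) * (tokens.length + 2) with hc
    omega

-- ===== VERDICT (by name: the statement is the Claim_ definition above) =====
theorem check_consecutive_terms_py_spec : Claim_equal_check_consecutive_terms_py := by
  intro tokens phrase_terms _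
  unfold Spec_check_consecutive_terms_py
  rw [Bool.eq_iff_iff]
  exact (A_iff tokens phrase_terms).trans (B_iff tokens phrase_terms).symm
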